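-- pv_equiv track=rewrite | github.com/SMU-CS202/Final-Project | brute_force.py | convert_edgelist_to_adj
-- ===== SOURCE A (Python) =====
-- def convert_edgelist_to_adj(edges, num_nodes): # convert an edgelist to adjacency list for manipulation
--     adj_matrix = [ [0] * num_nodes for i in range(num_nodes)] # first create an adjacency matrix
--     for edge in edges:
--         i = edge[0]
--         j = edge[1]
--         adj_matrix[i][j] = 1
--         adj_matrix[j][i] = 1
--
--     # Now build the adjacency list from the adjacency matrix
--     adj_list = {}
--
--     # First add keys, representing each node in the graph
--     for i in range(num_nodes):
--         adj_list[i] = []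
--
--     # Add neighbours for each  in the graph
--     for i in range(num_nodes):
--         for j in range(num_nodes):
--             if (adj_matrix[i][j] == 1):
--                 adj_list[i].append(j)
--     return adj_list
-- ===== SOURCE B (Python) =====
-- def convert_edgelist_to_adj(edges, num_nodes):
--     # one pass over the edges into per-node neighbour sets, then sort each set
--     nbrs = {i: set() for i in range(num_nodes)}
--     for edge in edges:
--         i, j = edge[0], edge[1]
--         nbrs[i].add(j)
--         nbrs[j].add(i)
--     return {i: sorted(s) for i, s in nbrs.items()}
-- ===== Notes on version B (the rewrite author's own statement) =====
-- stated objective: faster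
-- what changed: Replaces the O(num_nodes^2) adjacency-matrix construction and full matrix rescan with a single pass over the edges into per-node neighbour sets that are then sorted.
-- outside the precondition, e.g. on convert_edgelist_to_adj([(-1, 0)], 2): A returns {0: [1], 1: [0]}, B raises KeyError
import Mathlib
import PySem

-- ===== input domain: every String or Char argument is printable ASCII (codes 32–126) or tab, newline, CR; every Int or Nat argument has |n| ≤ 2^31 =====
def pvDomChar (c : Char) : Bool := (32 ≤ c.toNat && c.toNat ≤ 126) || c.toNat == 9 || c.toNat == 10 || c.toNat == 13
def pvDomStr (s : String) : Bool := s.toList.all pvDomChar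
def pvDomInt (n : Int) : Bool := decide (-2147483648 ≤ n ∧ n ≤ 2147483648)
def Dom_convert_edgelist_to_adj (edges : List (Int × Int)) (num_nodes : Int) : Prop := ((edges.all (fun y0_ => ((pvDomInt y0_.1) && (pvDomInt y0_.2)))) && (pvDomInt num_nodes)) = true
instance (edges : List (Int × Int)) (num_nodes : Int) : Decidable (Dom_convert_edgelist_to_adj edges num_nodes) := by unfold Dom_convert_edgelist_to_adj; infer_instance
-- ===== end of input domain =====

-- B replaces A's O(num_nodes^2) adjacency-matrix build-and-rescan by a single pass over the
-- edges into per-node neighbour sets, each then sorted (objective: faster).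

-- ===== PORT A =====
-- adj_matrix[i][j] read (Python indexing; in range on Pre_)
def pvMatGet (m : List (List Int)) (i j : Int) : Int :=
  PySem.List.pyGetD (PySem.List.pyGetD m i []) j 0
def pvRowSet (row : List Int) (j : Int) : List Int :=
  match PySem.List.pyIdx? row.length j with
  | some t => row.set t 1
  | none => row
def pvMatSet (m : List (List Int)) (i j : Int) : List (List Int) :=
  match PySem.List.pyIdx? m.length i with
  | some k => m.set k (pvRowSet (m.getD k []) j)
  | none => m
def convert_edgelist_to_adj (edges : List (Int × Int)) (num_nodes : Int) : List (Int × List Int) :=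
  -- adj_matrix = [[0] * num_nodes for i in range(num_nodes)]
  let mat0 : List (List Int) := (PySem.List.pyRange 0 num_nodes).map (fun _ => PySem.List.pyRepeat [0] num_nodes)
  -- for edge in edges: adj_matrix[i][j] = 1; adj_matrix[j][i] = 1
  let mat := edges.foldl (fun m e => pvMatSet (pvMatSet m e.1 e.2) e.2 e.1) mat0
  -- adj_list = {}; for i in range(num_nodes): adj_list[i] = []
  let d0 : PySem.Dict Int (List Int) :=
    (PySem.List.pyRange 0 num_nodes).foldl (fun d i => d.insert i []) PySem.Dict.empty
  -- for i in range(num_nodes): for j in range(num_nodes): if adj_matrix[i][j] == 1: adj_list[i].append(j)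
  let d := (PySem.List.pyRange 0 num_nodes).foldl (fun d i =>
      (PySem.List.pyRange 0 num_nodes).foldl (fun d j =>
        if pvMatGet mat i j == 1 then d.modify i [] (fun l => l ++ [j]) else d) d) d0
  d.items

-- ===== PORT B =====
def convert_edgelist_to_adj_alt (edges : List (Int × Int)) (num_nodes : Int) : List (Int × List Int) :=
  -- nbrs = {i: set() for i in range(num_nodes)}
  let d0 : PySem.Dict Int (PySem.Set Int) :=
    (PySem.List.pyRange 0 num_nodes).foldl (fun d i => d.insert i PySem.Set.empty) PySem.Dict.empty
  -- for edge in edges: nbrs[i].add(j); nbrs[j].add(i)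
  let d := edges.foldl (fun d e =>
      (d.modify e.1 PySem.Set.empty (fun s => s.add e.2)).modify e.2 PySem.Set.empty (fun s => s.add e.1)) d0
  -- {i: sorted(s) for i, s in nbrs.items()}
  d.items.map (fun p => (p.1, PySem.List.sorted p.2 (fun x => x)))

-- ===== PRECONDITION & SPEC =====
-- Pre_ excludes edges with an endpoint outside range(num_nodes): there A raises IndexError when
-- |endpoint| > num_nodes and silently wraps negative endpoints (an indexing artefact), while B
-- raises KeyError on any such edge.
def Pre_convert_edgelist_to_adj (edges : List (Int × Int)) (num_nodes : Int) : Prop :=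
  ∀ e ∈ edges, 0 ≤ e.1 ∧ e.1 < num_nodes ∧ 0 ≤ e.2 ∧ e.2 < num_nodes
instance (edges : List (Int × Int)) (num_nodes : Int) : Decidable (Pre_convert_edgelist_to_adj edges num_nodes) := by unfold Pre_convert_edgelist_to_adj; infer_instance

def pvWitness_convert_edgelist_to_adj : (List (Int × Int)) × Int := ([(0, 1), (1, 2), (2, 0), (1, 1)], 3)

def Spec_convert_edgelist_to_adj (edges : List (Int × Int)) (num_nodes : Int) (out : List (Int × List Int)) : Prop := out = convert_edgelist_to_adj_alt edges num_nodes
instance (edges : List (Int × Int)) (num_nodes : Int) (out : List (Int × List Int)) : Decidable (Spec_convert_edgelist_to_adj edges num_nodes out) := by unfold Spec_convert_edgelist_to_adj; infer_instance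

-- ===== CLAIM (what is proved, stated in full; the proofs are below) =====
def Claim_equal_convert_edgelist_to_adj : Prop := ∀ (edges : List (Int × Int)) (num_nodes : Int), Dom_convert_edgelist_to_adj edges num_nodes → Pre_convert_edgelist_to_adj edges num_nodes → Spec_convert_edgelist_to_adj edges num_nodes (convert_edgelist_to_adj edges num_nodes)

-- ===== LEMMAS AND PROOFS =====

def pvShape (n : Int) (m : List (List Int)) : Prop :=
  m.length = n.toNat ∧ ∀ row ∈ m, row.length = n.toNat

lemma pv_length_pyRange (n : Int) : (PySem.List.pyRange 0 n).length = n.toNat := by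
  rw [PySem.List.pyRange_of_pos 0 n (by norm_num)]; simp; omega

lemma pvShape_mat0 (n : Int) :
    pvShape n ((PySem.List.pyRange 0 n).map (fun _ => PySem.List.pyRepeat [0] n)) := by
  constructor
  · simp only [List.length_map]
    exact pv_length_pyRange n
  · intro row hr
    simp only [List.mem_map] at hr
    obtain ⟨_, _, rfl⟩ := hr
    simp [PySem.List.pyRepeat_singleton]

lemma pv_pyIdx?_lt {n : Nat} {i : Int} {k : Nat} (h : PySem.List.pyIdx? n i = some k) : k < n := by
  simp [PySem.List.pyIdx?] at h; split at h <;> split at h <;> simp_all <;> omega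

lemma pv_pyIdx?_of_range {n : Nat} {i : Int} (h0 : 0 ≤ i) (h1 : i < (n : Int)) :
    PySem.List.pyIdx? n i = some i.toNat := by
  simp [PySem.List.pyIdx?, h0, h1]

lemma pv_rowSet_length (row : List Int) (j : Int) : (pvRowSet row j).length = row.length := by
  unfold pvRowSet
  cases ht : PySem.List.pyIdx? row.length j <;> simp

lemma pvShape_matSet (n : Int) (m : List (List Int)) (a b : Int) (h : pvShape n m) :
    pvShape n (pvMatSet m a b) := by
  obtain ⟨h1, h2⟩ := h
  unfold pvMatSet
  cases hk : PySem.List.pyIdx? m.length a with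
  | none => exact ⟨h1, h2⟩
  | some k =>
    have hkl : k < m.length := pv_pyIdx?_lt hk
    refine ⟨by simpa using h1, ?_⟩
    intro row hr
    rcases List.mem_or_eq_of_mem_set hr with hmem | rfl
    · exact h2 _ hmem
    · rw [pv_rowSet_length, List.getD_eq_getElem m [] hkl]
      exact h2 _ (List.getElem_mem hkl)

lemma pvMatGet_matSet (n : Int) (m : List (List Int)) (a b i j : Int) (h : pvShape n m)
    (ha : 0 ≤ a ∧ a < n) (hb : 0 ≤ b ∧ b < n) (hi : 0 ≤ i ∧ i < n) (hj : 0 ≤ j ∧ j < n) :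
    pvMatGet (pvMatSet m a b) i j = if i = a ∧ j = b then 1 else pvMatGet m i j := by
  obtain ⟨h1, h2⟩ := h
  have hml : (m.length : Int) = n := by omega
  have hka : PySem.List.pyIdx? m.length a = some a.toNat := pv_pyIdx?_of_range ha.1 (by omega)
  have hal : a.toNat < m.length := by omega
  have hil : i.toNat < m.length := by omega
  have hrow : (m.getD a.toNat []).length = n.toNat := by
    rw [List.getD_eq_getElem m [] hal]; exact h2 _ (List.getElem_mem hal)
  have hrowi : (m.getD i.toNat []).length = n.toNat := by
    rw [List.getD_eq_getElem m [] hil]; exact h2 _ (List.getElem_mem hil)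
  have hrs : pvRowSet (m.getD a.toNat []) b = (m.getD a.toNat []).set b.toNat 1 := by
    unfold pvRowSet
    rw [hrow, pv_pyIdx?_of_range hb.1 (by omega)]
  unfold pvMatSet pvMatGet
  rw [hka]
  simp only [hrs]
  rw [PySem.List.pyGetD_of_nonneg m [] hi.1]
  have houter : PySem.List.pyGetD (m.set a.toNat ((m.getD a.toNat []).set b.toNat 1)) i []
      = if i = a then (m.getD a.toNat []).set b.toNat 1 else m.getD i.toNat [] := by
    rw [PySem.List.pyGetD_of_nonneg _ [] hi.1]
    rw [List.getD_eq_getElem _ [] (by simpa using hil), List.getElem_set]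
    split
    · rw [if_pos (by omega)]
    · rw [if_neg (by omega), List.getD_eq_getElem m [] hil]
  rw [houter]
  by_cases hia : i = a
  · subst hia
    rw [if_pos rfl]
    rw [PySem.List.pyGetD_of_nonneg _ 0 hj.1, PySem.List.pyGetD_of_nonneg _ 0 hj.1]
    have hjl : j.toNat < (m.getD i.toNat []).length := by omega
    rw [List.getD_eq_getElem _ 0 (by simpa using hjl),
        List.getD_eq_getElem _ 0 hjl, List.getElem_set]
    split
    · rw [if_pos (by omega)]
    · rw [if_neg (by omega)]
  · rw [if_neg hia, if_neg (by tauto)]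

def pvAdj (edges : List (Int × Int)) (i j : Int) : Bool :=
  edges.any (fun e => (e.1 == i && e.2 == j) || (e.1 == j && e.2 == i))

lemma pv_pyGetD_mem_or {α : Type} (xs : List α) (i : Int) (d : α) :
    PySem.List.pyGetD xs i d ∈ xs ∨ PySem.List.pyGetD xs i d = d := by
  unfold PySem.List.pyGetD PySem.List.pyGet?
  cases h : PySem.List.pyIdx? xs.length i with
  | none => simp
  | some k =>
    cases h2 : xs[k]? with
    | none => simp [h2]
    | some x => simp [h2]; exact Or.inl (List.mem_of_getElem? h2)

lemma pvMatGet_zeros (m : List (List Int)) (i j : Int)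
    (h : ∀ row ∈ m, ∀ x ∈ row, x = 0) : pvMatGet m i j = 0 := by
  unfold pvMatGet
  rcases pv_pyGetD_mem_or (PySem.List.pyGetD m i []) j 0 with hx | hx
  · rcases pv_pyGetD_mem_or m i [] with hr | hr
    · exact h _ hr _ hx
    · rw [hr] at hx; simp at hx
  · exact hx

lemma pvShape_fold (n : Int) (edges : List (Int × Int)) (m : List (List Int)) (h : pvShape n m) :
    pvShape n (edges.foldl (fun m e => pvMatSet (pvMatSet m e.1 e.2) e.2 e.1) m) := by
  induction edges generalizing m with
  | nil => exact h
  | cons e es ih => exact ih _ (pvShape_matSet n _ e.2 e.1 (pvShape_matSet n m e.1 e.2 h))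

lemma pvMatGet_fold (n : Int) (edges : List (Int × Int)) (m : List (List Int)) (i j : Int)
    (h : pvShape n m)
    (hp : ∀ e ∈ edges, 0 ≤ e.1 ∧ e.1 < n ∧ 0 ≤ e.2 ∧ e.2 < n)
    (hi : 0 ≤ i ∧ i < n) (hj : 0 ≤ j ∧ j < n) :
    pvMatGet (edges.foldl (fun m e => pvMatSet (pvMatSet m e.1 e.2) e.2 e.1) m) i j
      = if pvAdj edges i j then 1 else pvMatGet m i j := by
  induction edges generalizing m with
  | nil => simp [pvAdj]
  | cons e es ih =>
    have he := hp e (by simp)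
    have h1 : pvShape n (pvMatSet m e.1 e.2) := pvShape_matSet n m e.1 e.2 h
    rw [List.foldl_cons, ih _ (pvShape_matSet n _ e.2 e.1 h1) (fun x hx => hp x (by simp [hx]))]
    rw [pvMatGet_matSet n _ e.2 e.1 i j h1 ⟨he.2.2.1, he.2.2.2⟩ ⟨he.1, he.2.1⟩ hi hj]
    rw [pvMatGet_matSet n m e.1 e.2 i j h ⟨he.1, he.2.1⟩ ⟨he.2.2.1, he.2.2.2⟩ hi hj]
    simp only [pvAdj, List.any_cons]
    by_cases hes : (es.any fun e => e.1 == i && e.2 == j || e.1 == j && e.2 == i) = true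
    · simp [hes]
    · simp only [hes, Bool.or_false]
      split_ifs with h1 h2 h3 <;> simp_all
      omega

-- range helpers
lemma pv_range_nodup (n : Int) : (PySem.List.pyRange 0 n).Nodup :=
  (PySem.List.pairwise_lt_pyRange_one 0 n).imp (fun h => ne_of_lt h)

-- A's inner loop over j
lemma pvA_inner_getD (p : Int → Bool) (a : Int) (js : List Int) (d : PySem.Dict Int (List Int)) (x : Int) :
    ((js.foldl (fun d j => if p j then d.modify a [] (fun l => l ++ [j]) else d) d).getD x [])
      = if x = a then d.getD a [] ++ js.filter p else d.getD x [] := by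
  induction js generalizing d with
  | nil =>
    simp only [List.foldl_nil, List.filter_nil, List.append_nil]
    split_ifs with h1
    · rw [h1]
    · rfl
  | cons j js ih =>
    rw [List.foldl_cons, ih]
    by_cases hpj : p j
    · simp only [hpj, if_true, PySem.Dict.getD_modify, List.filter_cons]
      split_ifs with h1 <;> simp
    · simp only [List.filter_cons, hpj]
      simp

lemma pvA_inner_keys (p : Int → Bool) (a : Int) (js : List Int) (d : PySem.Dict Int (List Int))
    (h : d.contains a = true) :
    ((js.foldl (fun d j => if p j then d.modify a [] (fun l => l ++ [j]) else d) d).keys) = d.keys := by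
  induction js generalizing d with
  | nil => rfl
  | cons j js ih =>
    rw [List.foldl_cons]
    by_cases hpj : p j
    · simp only [hpj, if_true]
      rw [ih _ (by simp [PySem.Dict.contains_modify, h]),
          PySem.Dict.keys_modify, PySem.Dict.keys_insert_of_contains _ _ h]
    · simp only [hpj]
      exact ih _ h

-- A's outer loop over i
lemma pvA_outer_keys (q : Int → Int → Bool) (js : List Int) (is : List Int)
    (d : PySem.Dict Int (List Int)) (hc : ∀ i ∈ is, d.contains i = true) :
    ((is.foldl (fun d i => js.foldl (fun d j => if q i j then d.modify i [] (fun l => l ++ [j]) else d) d) d).keys) = d.keys := by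
  induction is generalizing d with
  | nil => rfl
  | cons i is ih =>
    rw [List.foldl_cons]
    have hk := pvA_inner_keys (q i) i js d (hc i (by simp))
    rw [ih _ (fun x hx => by
      rw [PySem.Dict.contains_iff_mem_keys, hk, ← PySem.Dict.contains_iff_mem_keys]
      exact hc x (by simp [hx])), hk]

lemma pvA_outer_getD (q : Int → Int → Bool) (js : List Int) (is : List Int)
    (d : PySem.Dict Int (List Int)) (hnd : is.Nodup) (hc : ∀ i ∈ is, d.contains i = true) (x : Int) :
    ((is.foldl (fun d i => js.foldl (fun d j => if q i j then d.modify i [] (fun l => l ++ [j]) else d) d) d).getD x [])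
      = if x ∈ is then d.getD x [] ++ js.filter (q x) else d.getD x [] := by
  induction is generalizing d with
  | nil => simp
  | cons i is ih =>
    rw [List.foldl_cons]
    have hk := pvA_inner_keys (q i) i js d (hc i (by simp))
    rw [ih _ hnd.of_cons (fun y hy => by
      rw [PySem.Dict.contains_iff_mem_keys, hk, ← PySem.Dict.contains_iff_mem_keys]
      exact hc y (by simp [hy]))]
    by_cases hx : x ∈ is
    · have hxi : x ≠ i := fun h => (List.nodup_cons.mp hnd).1 (h ▸ hx)
      rw [if_pos hx, if_pos (by simp [hx]), pvA_inner_getD, if_neg hxi]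
    · rw [if_neg hx]
      rw [pvA_inner_getD]
      by_cases hxi : x = i
      · rw [if_pos hxi, if_pos (by simp [hxi]), hxi]
      · rw [if_neg hxi, if_neg (by simp [hxi, hx])]

-- B's edge loop
lemma pvB_step_getD (e : Int × Int) (d : PySem.Dict Int (PySem.Set Int)) (i : Int) :
    (((d.modify e.1 PySem.Set.empty (fun s => s.add e.2)).modify e.2 PySem.Set.empty (fun s => s.add e.1)).getD i PySem.Set.empty)
    = if i = e.2 then ((d.modify e.1 PySem.Set.empty (fun s => s.add e.2)).getD e.2 PySem.Set.empty).add e.1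
      else if i = e.1 then (d.getD e.1 PySem.Set.empty).add e.2 else d.getD i PySem.Set.empty := by
  rw [PySem.Dict.getD_modify]
  split_ifs with h1 h2
  · rfl
  · rw [PySem.Dict.getD_modify, if_pos h2]
  · rw [PySem.Dict.getD_modify, if_neg h2]

lemma pvB_mem (edges : List (Int × Int)) (d : PySem.Dict Int (PySem.Set Int)) (i x : Int) :
    (x ∈ (edges.foldl (fun d e =>
        (d.modify e.1 PySem.Set.empty (fun s => s.add e.2)).modify e.2 PySem.Set.empty (fun s => s.add e.1)) d).getD i PySem.Set.empty)
    ↔ (x ∈ d.getD i PySem.Set.empty ∨ pvAdj edges i x = true) := by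
  induction edges generalizing d with
  | nil => simp [pvAdj]
  | cons e es ih =>
    obtain ⟨a, b⟩ := e
    rw [List.foldl_cons, ih, pvB_step_getD]
    simp only [pvAdj, List.any_cons, Bool.or_eq_true, Bool.and_eq_true, beq_iff_eq]
    by_cases h2 : i = b <;> by_cases h1 : i = a <;> by_cases h3 : a = b <;>
      simp [PySem.Dict.getD_modify, PySem.Set.mem_add, h2, h1, h3] <;> aesop

lemma pvB_keys (edges : List (Int × Int)) (d : PySem.Dict Int (PySem.Set Int))
    (hc : ∀ e ∈ edges, d.contains e.1 = true ∧ d.contains e.2 = true) :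
    ((edges.foldl (fun d e =>
        (d.modify e.1 PySem.Set.empty (fun s => s.add e.2)).modify e.2 PySem.Set.empty (fun s => s.add e.1)) d).keys) = d.keys := by
  induction edges generalizing d with
  | nil => rfl
  | cons e es ih =>
    rw [List.foldl_cons]
    have he := hc e (by simp)
    have hk : ((d.modify e.1 PySem.Set.empty (fun s => s.add e.2)).modify e.2 PySem.Set.empty (fun s => s.add e.1)).keys = d.keys := by
      rw [PySem.Dict.keys_modify, PySem.Dict.keys_insert_of_contains _ _ (by simp [PySem.Dict.contains_modify, he.2]),
          PySem.Dict.keys_modify, PySem.Dict.keys_insert_of_contains _ _ he.1]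
    rw [ih _ (fun y hy => ?_), hk]
    constructor
    · rw [PySem.Dict.contains_iff_mem_keys, hk, ← PySem.Dict.contains_iff_mem_keys]
      exact (hc y (by simp [hy])).1
    · rw [PySem.Dict.contains_iff_mem_keys, hk, ← PySem.Dict.contains_iff_mem_keys]
      exact (hc y (by simp [hy])).2

lemma pvB_nodup (edges : List (Int × Int)) (d : PySem.Dict Int (PySem.Set Int))
    (h : ∀ i, (d.getD i PySem.Set.empty).Nodup) (i : Int) :
    ((edges.foldl (fun d e =>
        (d.modify e.1 PySem.Set.empty (fun s => s.add e.2)).modify e.2 PySem.Set.empty (fun s => s.add e.1)) d).getD i PySem.Set.empty).Nodup := by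
  induction edges generalizing d with
  | nil => exact h i
  | cons e es ih =>
    rw [List.foldl_cons]
    refine ih _ (fun y => ?_) 
    rw [pvB_step_getD]
    split_ifs
    · refine PySem.Set.nodup_add _ _ ?_
      rw [PySem.Dict.getD_modify]
      split_ifs
      · exact PySem.Set.nodup_add _ _ (h e.1)
      · exact h e.2
    · exact PySem.Set.nodup_add _ _ (h e.1)
    · exact h y

lemma pvA_d0_items (n : Int) :
    ((PySem.List.pyRange 0 n).foldl (fun d i => d.insert i []) (PySem.Dict.empty : PySem.Dict Int (List Int))).items
      = (PySem.List.pyRange 0 n).map (fun i => (i, ([] : List Int))) := by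
  rw [PySem.Dict.items_foldl_insert_fresh _ (fun a => a) (fun _ => ([] : List Int)) _
      (fun a _ => PySem.Dict.contains_empty a) (by simpa using pv_range_nodup n)]
  rfl

lemma pvB_d0_items (n : Int) :
    ((PySem.List.pyRange 0 n).foldl (fun d i => d.insert i PySem.Set.empty) (PySem.Dict.empty : PySem.Dict Int (PySem.Set Int))).items
      = (PySem.List.pyRange 0 n).map (fun i => (i, (PySem.Set.empty : PySem.Set Int))) := by
  rw [PySem.Dict.items_foldl_insert_fresh _ (fun a => a) (fun _ => (PySem.Set.empty : PySem.Set Int)) _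
      (fun a _ => PySem.Dict.contains_empty a) (by simpa using pv_range_nodup n)]
  rfl

lemma pvA_d0_keys (n : Int) :
    ((PySem.List.pyRange 0 n).foldl (fun d i => d.insert i []) (PySem.Dict.empty : PySem.Dict Int (List Int))).keys
      = PySem.List.pyRange 0 n := by
  simp only [PySem.Dict.keys, pvA_d0_items, List.map_map]
  simp [Function.comp_def]

lemma pvB_d0_keys (n : Int) :
    ((PySem.List.pyRange 0 n).foldl (fun d i => d.insert i PySem.Set.empty) (PySem.Dict.empty : PySem.Dict Int (PySem.Set Int))).keys
      = PySem.List.pyRange 0 n := by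
  simp only [PySem.Dict.keys, pvB_d0_items, List.map_map]
  simp [Function.comp_def]

lemma pvA_d0_getD (n : Int) (k : Int) (hk : k ∈ PySem.List.pyRange 0 n) :
    ((PySem.List.pyRange 0 n).foldl (fun d i => d.insert i []) (PySem.Dict.empty : PySem.Dict Int (List Int))).getD k [] = [] := by
  refine PySem.Dict.getD_of_mem_items _ ?_ (by rw [pvA_d0_keys]; exact pv_range_nodup n) []
  rw [pvA_d0_items]
  exact List.mem_map.mpr ⟨k, hk, rfl⟩

lemma pvB_d0_getD (n : Int) (k : Int) :
    ((PySem.List.pyRange 0 n).foldl (fun d i => d.insert i PySem.Set.empty) (PySem.Dict.empty : PySem.Dict Int (PySem.Set Int))).getD k PySem.Set.empty = PySem.Set.empty := by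
  by_cases hk : k ∈ PySem.List.pyRange 0 n
  · refine PySem.Dict.getD_of_mem_items _ ?_ (by rw [pvB_d0_keys]; exact pv_range_nodup n) PySem.Set.empty
    rw [pvB_d0_items]
    exact List.mem_map.mpr ⟨k, hk, rfl⟩
  · refine PySem.Dict.getD_of_not_contains _ _ ?_
    rw [← Bool.not_eq_true, PySem.Dict.contains_iff_mem_keys, pvB_d0_keys]
    exact hk

lemma pv_sorted_eq_filter (S : List Int) (p : Int → Bool) (n : Int) (hnd : S.Nodup)
    (hmem : ∀ x, x ∈ S ↔ (x ∈ PySem.List.pyRange 0 n ∧ p x = true)) :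
    PySem.List.sorted S (fun x => x) = (PySem.List.pyRange 0 n).filter p := by
  refine PySem.List.sorted_eq_of_perm_of_pairwise_lt S _ (fun x => x) ?_ ?_
  · refine (List.perm_ext_iff_of_nodup ((pv_range_nodup n).filter p) hnd).mpr (fun a => ?_)
    rw [List.mem_filter, hmem]
  · exact (PySem.List.pairwise_lt_pyRange_one 0 n).filter p


-- ===== VERDICT (by name: the statement is the Claim_ definition above) =====
theorem convert_edgelist_to_adj_spec : Claim_equal_convert_edgelist_to_adj := by
  intro edges n _ hpre
  unfold Pre_convert_edgelist_to_adj at hpre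
  unfold Spec_convert_edgelist_to_adj
  unfold convert_edgelist_to_adj convert_edgelist_to_adj_alt
  dsimp only
  -- abbreviations
  set R := PySem.List.pyRange 0 n with hR
  set mat0 : List (List Int) := R.map (fun _ => PySem.List.pyRepeat [0] n) with hmat0
  set mat := edges.foldl (fun m e => pvMatSet (pvMatSet m e.1 e.2) e.2 e.1) mat0 with hmat
  set d0A : PySem.Dict Int (List Int) := R.foldl (fun d i => d.insert i []) PySem.Dict.empty with hd0A
  set dA := R.foldl (fun d i =>
      R.foldl (fun d j => if pvMatGet mat i j == 1 then d.modify i [] (fun l => l ++ [j]) else d) d) d0A with hdA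
  set d0B : PySem.Dict Int (PySem.Set Int) := R.foldl (fun d i => d.insert i PySem.Set.empty) PySem.Dict.empty with hd0B
  set dB := edges.foldl (fun d e =>
      (d.modify e.1 PySem.Set.empty (fun s => s.add e.2)).modify e.2 PySem.Set.empty (fun s => s.add e.1)) d0B with hdB
  have hcA : ∀ i ∈ R, d0A.contains i = true := fun i hi => by
    rw [PySem.Dict.contains_iff_mem_keys, hd0A, pvA_d0_keys]; exact hi
  have hAkeys : dA.keys = R := by
    rw [hdA, pvA_outer_keys _ _ _ _ hcA, hd0A, pvA_d0_keys]
  have hBkeys : dB.keys = R := by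
    rw [hdB, pvB_keys _ _ (fun e he => by
      have h := hpre e he
      constructor <;> (rw [PySem.Dict.contains_iff_mem_keys, hd0B, pvB_d0_keys, PySem.List.mem_pyRange_one])
      exacts [⟨h.1, h.2.1⟩, ⟨h.2.2.1, h.2.2.2⟩]), hd0B, pvB_d0_keys]
  rw [PySem.Dict.items_eq_map_keys dA (by rw [hAkeys]; exact pv_range_nodup n) [],
      PySem.Dict.items_eq_map_keys dB (by rw [hBkeys]; exact pv_range_nodup n) PySem.Set.empty,
      hAkeys, hBkeys, List.map_map]
  refine List.map_congr_left (fun k hk => ?_)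
  dsimp only [Function.comp]
  refine Prod.ext rfl ?_
  -- A side value
  have hshape : pvShape n mat := hmat ▸ pvShape_fold n edges mat0 (pvShape_mat0 n)
  have hmemk := PySem.List.mem_pyRange_one.mp hk
  have hAval : dA.getD k [] = R.filter (fun j => pvAdj edges k j) := by
    rw [hdA, pvA_outer_getD _ _ _ _ (pv_range_nodup n) hcA, if_pos hk, hd0A,
        pvA_d0_getD n k hk, List.nil_append]
    refine List.filter_congr (fun j hj => ?_)
    have hmemj := PySem.List.mem_pyRange_one.mp hj
    rw [hmat, pvMatGet_fold n edges mat0 k j (pvShape_mat0 n) hpre hmemk hmemj]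
    have h0 : pvMatGet mat0 k j = 0 := by
      refine pvMatGet_zeros _ _ _ (fun row hr x hx => ?_)
      rw [hmat0] at hr
      simp only [List.mem_map] at hr
      obtain ⟨_, _, rfl⟩ := hr
      rw [PySem.List.pyRepeat_singleton] at hx
      exact List.eq_of_mem_replicate hx
    rw [h0]
    by_cases hadj : pvAdj edges k j = true
    · rw [if_pos hadj, hadj]
      rfl
    · rw [if_neg hadj]
      rw [Bool.not_eq_true] at hadj
      rw [hadj]
      rfl
  -- B side value
  have hBval : PySem.List.sorted (dB.getD k PySem.Set.empty) (fun x => x)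
      = R.filter (fun j => pvAdj edges k j) := by
    refine pv_sorted_eq_filter _ _ n ?_ ?_
    · rw [hdB]
      exact pvB_nodup edges d0B (fun i => by rw [hd0B, pvB_d0_getD]; exact List.nodup_nil) k
    · intro x
      rw [hdB, pvB_mem, hd0B, pvB_d0_getD]
      simp only [PySem.Set.empty, List.not_mem_nil, false_or]
      constructor
      · intro h
        refine ⟨?_, h⟩
        simp only [pvAdj, List.any_eq_true, Bool.or_eq_true, Bool.and_eq_true, beq_iff_eq] at h
        obtain ⟨e, he, h⟩ := h
        have hb := hpre e he
        rw [PySem.List.mem_pyRange_one]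
        rcases h with ⟨-, rfl⟩ | ⟨rfl, -⟩
        · exact ⟨hb.2.2.1, hb.2.2.2⟩
        · exact ⟨hb.1, hb.2.1⟩
      · exact fun h => h.2
  rw [hAval, hBval]
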